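-- pv_equiv track=rewrite | github.com/sudonav/EdgeDetection | Task1.py | generateGradientX
-- ===== SOURCE A (Python) =====
-- def generateSobelFilterGx():
--     sobelFilterGx = [[-1,0,1],
--                      [-2,0,2],
--                      [-1,0,1]]
--     return sobelFilterGx
--
-- def generatePatch(image, x, y):
--     return [[(image[i][j] if ((i >= 0 and i < len(image)) and (j >= 0 and j < len(image[0]))) else 0) for j in range(y-1, y+2, 1)] for i in range(x-1, x+2, 1)]
--
-- def convolvePatch(patch):
--     convolvedPatch = [patch[j][i] for j in range(len(patch[0])-1,-1,-1) for i in range(len(patch)-1,-1,-1)]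
--     return [convolvedPatch[i:i+len(patch)] for i in range(0, len(convolvedPatch), len(patch))]
--
-- def generateGradientX(x, y, imageIntensity, convolve):
--     patch = generatePatch(imageIntensity, x, y)
--     if(convolve == True):
--         convolvedPatch = convolvePatch(patch)
--     else:
--         convolvedPatch = patch
--     sobelFilterGx = generateSobelFilterGx()
--     gradientX = sum([sum([convolvedPatch[i][j] * sobelFilterGx[i][j] for j in range(len(sobelFilterGx))]) for i in range(len(sobelFilterGx))])
--     return int(gradientX)
-- ===== SOURCE B (Python) =====
-- def generateGradientX(x, y, imageIntensity, convolve):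
--     kernel = [[-1, 0, 1],
--               [-2, 0, 2],
--               [-1, 0, 1]]
--     gradientX = 0
--     for i in range(3):
--         for j in range(3):
--             px = x - 1 + i
--             py = y - 1 + j
--             if 0 <= px < len(imageIntensity) and 0 <= py < len(imageIntensity[0]):
--                 val = imageIntensity[px][py]
--             else:
--                 val = 0
--             if convolve == True:
--                 gradientX += val * kernel[2 - i][2 - j]
--             else:
--                 gradientX += val * kernel[i][j]
--     return int(gradientX)
-- ===== Notes on version B (the rewrite author's own statement) =====
-- stated objective: simpler
-- what changed: B replaces the build-patch / rotate-patch / dot-product pipeline with a single fused accumulation over the 9 kernel offsets, reading each pixel once and indexing the kernel rotated 180 degrees when convolve is True, with no intermediate 2D lists.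
import Mathlib
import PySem

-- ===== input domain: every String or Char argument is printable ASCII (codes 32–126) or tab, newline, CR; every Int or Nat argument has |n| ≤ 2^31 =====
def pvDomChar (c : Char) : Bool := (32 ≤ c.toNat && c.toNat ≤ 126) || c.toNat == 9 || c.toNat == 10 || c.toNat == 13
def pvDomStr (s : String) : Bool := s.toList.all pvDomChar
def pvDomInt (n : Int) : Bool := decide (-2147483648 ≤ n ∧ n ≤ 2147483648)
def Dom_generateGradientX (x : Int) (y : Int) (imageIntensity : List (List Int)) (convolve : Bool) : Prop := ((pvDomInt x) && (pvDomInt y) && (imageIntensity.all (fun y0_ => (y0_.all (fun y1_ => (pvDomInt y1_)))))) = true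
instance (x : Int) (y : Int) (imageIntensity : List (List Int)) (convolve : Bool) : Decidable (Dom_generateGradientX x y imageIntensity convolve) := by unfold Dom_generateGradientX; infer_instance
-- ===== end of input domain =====

-- B fuses patch extraction, optional 180° kernel rotation and the dot product into one
-- accumulation over the 9 kernel offsets, never building the intermediate 2D lists (objective: simpler).

-- ===== PORT A =====
def pvGenerateSobelFilterGx : List (List Int) := [[-1, 0, 1], [-2, 0, 2], [-1, 0, 1]]

def pvGeneratePatch (image : List (List Int)) (x : Int) (y : Int) : List (List Int) :=
  (PySem.List.pyRange (x - 1) (x + 2) 1).map (fun i =>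
    (PySem.List.pyRange (y - 1) (y + 2) 1).map (fun j =>
      if (0 ≤ i ∧ i < (image.length : Int)) ∧ 0 ≤ j ∧ j < ((((PySem.List.pyGet? image 0).getD []).length : Int))
      then (PySem.List.pyGet? ((PySem.List.pyGet? image i).getD []) j).getD 0 else 0))

def pvConvolvePatch (patch : List (List Int)) : List (List Int) :=
  let convolvedPatch :=
    (PySem.List.pyRange ((((PySem.List.pyGet? patch 0).getD []).length : Int) - 1) (-1) (-1)).flatMap (fun j =>
      (PySem.List.pyRange ((patch.length : Int) - 1) (-1) (-1)).map (fun i =>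
        (PySem.List.pyGet? ((PySem.List.pyGet? patch j).getD []) i).getD 0))
  (PySem.List.pyRange 0 (convolvedPatch.length : Int) (patch.length : Int)).map (fun i =>
    PySem.List.slice convolvedPatch (some i) (some (i + (patch.length : Int))))

-- indexing convolvedPatch[i][j] / sobelFilterGx[i][j] with loop Nat indices 0..2, always in range: List.getD is exact here
def generateGradientX (x : Int) (y : Int) (imageIntensity : List (List Int)) (convolve : Bool) : Int :=
  let patch := pvGeneratePatch imageIntensity x y
  let convolvedPatch := if convolve = true then pvConvolvePatch patch else patch
  let sobelFilterGx := pvGenerateSobelFilterGx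
  ((List.range sobelFilterGx.length).map (fun i =>
    ((List.range sobelFilterGx.length).map (fun j =>
      (convolvedPatch.getD i []).getD j 0 * (sobelFilterGx.getD i []).getD j 0)).sum)).sum

-- ===== PORT B =====
def pvKernelAt (i j : Nat) : Int :=
  (([[-1, 0, 1], [-2, 0, 2], [-1, 0, 1]] : List (List Int)).getD i []).getD j 0

def pvPix (image : List (List Int)) (px py : Int) : Int :=
  if (0 ≤ px ∧ px < (image.length : Int)) ∧ 0 ≤ py ∧ py < ((((PySem.List.pyGet? image 0).getD []).length : Int))
  then (PySem.List.pyGet? ((PySem.List.pyGet? image px).getD []) py).getD 0 else 0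

def generateGradientX_alt (x : Int) (y : Int) (imageIntensity : List (List Int)) (convolve : Bool) : Int :=
  (List.range 3).foldl (fun (g : Int) (i : Nat) =>
    (List.range 3).foldl (fun (g : Int) (j : Nat) =>
      let px := x - 1 + (i : Int)
      let py := y - 1 + (j : Int)
      let val := pvPix imageIntensity px py
      g + val * (if convolve = true then pvKernelAt (2 - i) (2 - j) else pvKernelAt i j)) g) 0

-- ===== PRECONDITION & SPEC =====
-- Pre_ excludes exactly the inputs where Python A raises IndexError: a ragged image whose row i,
-- inside the 3x3 window and shorter than row 0, is accessed at a column j < len(row 0) but ≥ len(row i).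
def Pre_generateGradientX (x : Int) (y : Int) (imageIntensity : List (List Int)) (convolve : Bool) : Prop :=
  ∀ i ∈ [x - 1, x, x + 1], ∀ j ∈ [y - 1, y, y + 1],
    0 ≤ i → i < (imageIntensity.length : Int) → 0 ≤ j → j < ((imageIntensity.headD []).length : Int) →
      j < ((imageIntensity.getD i.toNat []).length : Int)
instance (x : Int) (y : Int) (imageIntensity : List (List Int)) (convolve : Bool) : Decidable (Pre_generateGradientX x y imageIntensity convolve) := by unfold Pre_generateGradientX; infer_instance

def pvWitness_generateGradientX : Int × Int × List (List Int) × Bool := (1, 1, [[1, 2, 3], [4, 5, 6], [7, 8, 9]], true)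

def Spec_generateGradientX (x : Int) (y : Int) (imageIntensity : List (List Int)) (convolve : Bool) (out : Int) : Prop := out = generateGradientX_alt x y imageIntensity convolve
instance (x : Int) (y : Int) (imageIntensity : List (List Int)) (convolve : Bool) (out : Int) : Decidable (Spec_generateGradientX x y imageIntensity convolve out) := by unfold Spec_generateGradientX; infer_instance

-- ===== CLAIM (what is proved, stated in full; the proofs are below) =====
def Claim_equal_generateGradientX : Prop := ∀ (x : Int) (y : Int) (imageIntensity : List (List Int)) (convolve : Bool), Dom_generateGradientX x y imageIntensity convolve → Pre_generateGradientX x y imageIntensity convolve → Spec_generateGradientX x y imageIntensity convolve (generateGradientX x y imageIntensity convolve)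

-- ===== LEMMAS AND PROOFS =====
theorem pyRange_around (a : Int) : PySem.List.pyRange (a - 1) (a + 2) 1 = [a - 1, a, a + 1] := by
  rw [PySem.List.pyRange_one_cons (by omega), PySem.List.pyRange_one_cons (by omega),
      PySem.List.pyRange_one_cons (by omega), PySem.List.pyRange_one_eq_nil (by omega)]
  norm_num

theorem pvConvolvePatch_eval (a b c d e f g h i : Int) :
    pvConvolvePatch [[a, b, c], [d, e, f], [g, h, i]] = [[i, h, g], [f, e, d], [c, b, a]] := by
  simp [pvConvolvePatch, PySem.List.pyGet?, PySem.List.pyIdx?, PySem.List.slice,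
        show PySem.List.pyRange 2 (-1) (-1) = [2, 1, 0] from by decide,
        show PySem.List.pyRange 0 9 3 = [0, 3, 6] from by decide,
        PySem.List.clampIdx]

theorem patch_eval (img : List (List Int)) (x y : Int) :
    pvGeneratePatch img x y =
      [[pvPix img (x - 1) (y - 1), pvPix img (x - 1) y, pvPix img (x - 1) (y + 1)],
       [pvPix img x (y - 1), pvPix img x y, pvPix img x (y + 1)],
       [pvPix img (x + 1) (y - 1), pvPix img (x + 1) y, pvPix img (x + 1) (y + 1)]] := by
  simp only [pvGeneratePatch, pyRange_around, List.map_cons, List.map_nil, pvPix]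

theorem main_equal (x y : Int) (img : List (List Int)) (c : Bool) :
    generateGradientX x y img c = generateGradientX_alt x y img c := by
  have r3 : List.range 3 = [0, 1, 2] := by decide
  have e1 : x - 1 + (1 : Int) = x := by ring
  have e2 : x - 1 + (2 : Int) = x + 1 := by ring
  have f1 : y - 1 + (1 : Int) = y := by ring
  have f2 : y - 1 + (2 : Int) = y + 1 := by ring
  cases c <;>
    (simp [generateGradientX, generateGradientX_alt, patch_eval, pvConvolvePatch_eval,
           pvGenerateSobelFilterGx, pvKernelAt, r3, e1, e2, f1, f2]
     ring)

-- ===== VERDICT (by name: the statement is the Claim_ definition above) =====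
theorem generateGradientX_spec : Claim_equal_generateGradientX := by
  intro x y img c _ _
  exact main_equal x y img c
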